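-- pv_equiv track=rewrite | github.com/deletella01/Melody_Finder | app.py | flatten_dict_list
-- ===== SOURCE A (Python) =====
-- from collections import defaultdict
--
-- def flatten_dict_list(dict_list):
--     flattened_dict = defaultdict(list)
--     for key in dict_list[0].keys():
--         flattened_dict[key] = []
--
--     for dictionary in dict_list:
--         for key, value in dictionary.items():
--             flattened_dict[key].append(value)
--     return flattened_dict
-- ===== SOURCE B (Python) =====
-- from collections import defaultdict
--
-- def flatten_dict_list(dict_list):
--     # Field-major: compute the key order first, then gather each key's column.
--     keys = list(dict_list[0].keys())
--     seen = set(keys)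
--     for d in dict_list:
--         for k in d:
--             if k not in seen:
--                 seen.add(k)
--                 keys.append(k)
--     result = defaultdict(list)
--     for k in keys:
--         result[k] = [d[k] for d in dict_list if k in d]
--     return result
-- ===== Notes on version B (the rewrite author's own statement) =====
-- stated objective: alternative
-- what changed: Record-major accumulation into a defaultdict (append each value as records are scanned) is replaced by a field-major pass: the key order is computed first, then each key's value column is gathered by one comprehension per key.
import Mathlib
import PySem

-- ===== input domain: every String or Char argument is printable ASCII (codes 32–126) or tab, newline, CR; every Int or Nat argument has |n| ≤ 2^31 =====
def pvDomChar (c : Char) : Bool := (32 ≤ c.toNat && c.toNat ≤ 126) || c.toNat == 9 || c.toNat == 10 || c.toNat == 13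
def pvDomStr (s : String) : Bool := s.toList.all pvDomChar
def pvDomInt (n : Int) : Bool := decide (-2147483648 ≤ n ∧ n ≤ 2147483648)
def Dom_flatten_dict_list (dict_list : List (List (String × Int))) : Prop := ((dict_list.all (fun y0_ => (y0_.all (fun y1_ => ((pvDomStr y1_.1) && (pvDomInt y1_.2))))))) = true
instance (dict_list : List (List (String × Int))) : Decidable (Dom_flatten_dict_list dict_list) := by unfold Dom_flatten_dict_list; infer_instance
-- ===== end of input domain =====

-- B changes the decomposition from record-major accumulation into a defaultdict to a
-- field-major pass (key order first, then one column per key); return values proved equal on Pre_.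

-- ===== PORT A =====
-- dict_list[0] raises IndexError on the empty list (excluded by Pre_); headD [] is used there.
def flatten_dict_list (dict_list : List (List (String × Int))) : List (String × List Int) :=
  let d0 : PySem.Dict String (List Int) :=
    ((dict_list.headD []).map Prod.fst).foldl (fun d k => d.insert k []) PySem.Dict.empty
  (dict_list.foldl (fun d dict =>
      dict.foldl (fun d kv => d.modify kv.1 [] (fun l => l ++ [kv.2])) d) d0).items

-- ===== PORT B =====
def flatten_dict_list_alt (dict_list : List (List (String × Int))) : List (String × List Int) :=
  let keys : PySem.Set String :=
    dict_list.foldl (fun ks d => d.foldl (fun ks kv => PySem.Set.add ks kv.1) ks)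
      ((dict_list.headD []).map Prod.fst)
  keys.map (fun k => (k, dict_list.filterMap (fun d => (d.find? (fun kv => kv.1 == k)).map Prod.snd)))

-- ===== PRECONDITION & SPEC =====
-- Pre_ excludes the empty list (A raises IndexError) and inner lists with duplicate keys,
-- which do not represent any Python dict (a dict's keys are unique).
def Pre_flatten_dict_list (dict_list : List (List (String × Int))) : Prop :=
  dict_list ≠ [] ∧ ∀ d ∈ dict_list, (d.map Prod.fst).Nodup
instance (dict_list : List (List (String × Int))) : Decidable (Pre_flatten_dict_list dict_list) := by
  unfold Pre_flatten_dict_list; infer_instance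
def pvWitness_flatten_dict_list : (List (List (String × Int))) := [[("a", 1), ("b", 2)], [("b", 3), ("c", 4)]]
def Spec_flatten_dict_list (dict_list : List (List (String × Int))) (out : List (String × List Int)) : Prop := out = flatten_dict_list_alt dict_list
instance (dict_list : List (List (String × Int))) (out : List (String × List Int)) : Decidable (Spec_flatten_dict_list dict_list out) := by unfold Spec_flatten_dict_list; infer_instance

-- ===== CLAIM (what is proved, stated in full; the proofs are below) =====
def Claim_equal_flatten_dict_list : Prop := ∀ (dict_list : List (List (String × Int))), Dom_flatten_dict_list dict_list → Pre_flatten_dict_list dict_list → Spec_flatten_dict_list dict_list (flatten_dict_list dict_list)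

-- ===== LEMMAS AND PROOFS =====

-- nested record loop = one loop over the flattened pair list
theorem nest_foldl {α β : Type} (ds : List (List α)) (step : β → α → β) (b : β) :
    ds.foldl (fun b d => d.foldl step b) b = ds.flatten.foldl step b := by
  induction ds generalizing b with
  | nil => rfl
  | cons d ds ih => simp [List.foldl_append, ih]

-- seeding the dict with empty lists leaves every getD _ [] at []
theorem getD_seed (ks : List String) (d : PySem.Dict String (List Int)) (x : String)
    (h : d.getD x [] = []) :
    (ks.foldl (fun d k => d.insert k []) d).getD x [] = [] := by
  induction ks generalizing d with
  | nil => exact h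
  | cons k ks ih =>
      refine ih _ ?_
      rw [PySem.Dict.getD_insert]
      split <;> simp [h]

-- one dict's column: filter agrees with the find?-based lookup when the dict's keys are unique
theorem perdict_col (k : String) (d : List (String × Int)) (h : (d.map Prod.fst).Nodup) :
    (d.filter (fun p => p.1 == k)).map Prod.snd
      = ((d.find? (fun kv => kv.1 == k)).map Prod.snd).toList := by
  induction d with
  | nil => rfl
  | cons p d ih =>
      simp only [List.map_cons, List.nodup_cons] at h
      by_cases hk : p.1 == k
      · have hkeq : p.1 = k := by simpa using hk
        have hnil : d.filter (fun p => p.1 == k) = [] := by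
          refine List.filter_eq_nil_iff.mpr ?_
          intro q hq
          have : q.1 ∈ d.map Prod.fst := List.mem_map_of_mem hq
          simp only [beq_iff_eq]
          intro hqk
          exact h.1 (by rw [hqk, ← hkeq] at this; exact this)
        simp [hk, hnil]
      · simp [hk, ih h.2]

-- the whole column of key k: filter over the flattened pairs = per-dict find? lookups
theorem col_eq (k : String) (ds : List (List (String × Int)))
    (h : ∀ d ∈ ds, (d.map Prod.fst).Nodup) :
    (ds.flatten.filter (fun p => p.1 == k)).map Prod.snd
      = ds.filterMap (fun d => (d.find? (fun kv => kv.1 == k)).map Prod.snd) := by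
  induction ds with
  | nil => rfl
  | cons d ds ih =>
      have hd := h d (List.mem_cons_self ..)
      have ih' := ih (fun d' hd' => h d' (List.mem_cons_of_mem _ hd'))
      rw [List.flatten_cons, List.filter_append, List.map_append, ih', perdict_col k d hd]
      rcases hf : d.find? (fun kv => kv.1 == k) with _ | p <;> simp [hf]

-- ===== VERDICT (by name: the statement is the Claim_ definition above) =====
theorem flatten_dict_list_spec : Claim_equal_flatten_dict_list := by
  intro dict_list _ hpre
  obtain ⟨-, hnd⟩ := hpre
  unfold Spec_flatten_dict_list flatten_dict_list flatten_dict_list_alt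
  simp only []
  set keys0 := (dict_list.headD []).map Prod.fst with hkeys0
  have hk0nd : keys0.Nodup := by
    cases dict_list with
    | nil => simp [hkeys0]
    | cons d ds => exact hnd d (List.mem_cons_self ..)
  -- the seed dict
  set d0 : PySem.Dict String (List Int) :=
    keys0.foldl (fun d k => d.insert k []) PySem.Dict.empty with hd0
  -- collapse both nested loops
  rw [nest_foldl, nest_foldl]
  set pairs := dict_list.flatten with hpairs
  -- keys of the final dict
  have hkd0 : d0.keys = keys0 := by
    rw [hd0, PySem.Dict.keys_foldl_insert, PySem.Dict.keys_empty,
        PySem.Set.update_nil_left, PySem.Set.ofList_eq_self_of_nodup _ hk0nd]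
  have hknd : (pairs.foldl (fun d kv => d.modify kv.1 [] (fun l => l ++ [kv.2])) d0).keys.Nodup := by
    refine PySem.Dict.nodup_keys_foldl_modify_key pairs Prod.fst [] (fun d kv => fun l => l ++ [kv.2]) d0 ?_
    rw [hkd0]; exact hk0nd
  have hkeys : (pairs.foldl (fun d kv => d.modify kv.1 [] (fun l => l ++ [kv.2])) d0).keys
      = pairs.foldl (fun ks kv => PySem.Set.add ks kv.1) keys0 := by
    rw [PySem.Dict.keys_foldl_modify_key, hkd0, ← PySem.Set.update_map_eq_foldl_add]
  rw [PySem.Dict.items_eq_map_keys _ hknd ([] : List Int), hkeys]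
  refine List.map_congr_left (fun k _ => ?_)
  have hgetD : (pairs.foldl (fun d kv => d.modify kv.1 [] (fun l => l ++ [kv.2])) d0).getD k []
      = (pairs.filter (fun p => p.1 == k)).map Prod.snd := by
    rw [PySem.Dict.getD_foldl_modify_append, getD_seed keys0 _ k (by simp [PySem.Dict.getD_empty])]
    rfl
  rw [hgetD, hpairs, col_eq k dict_list hnd]
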